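-- pv_equiv track=rewrite | github.com/OtsoValo/UTSC-Works | CSCA08/assign2/a2_starter/database.py | store_table_list
-- ===== SOURCE A (Python) =====
-- def store_table_list(titles, content):
--     ''' (Table, list of str, list of str list) -> list of str list
--
--     The function will receive two lists as parameters and store two lists.
--     The first list is the title of the table and the second list is
--     the content of each table.
--     The function will create a matrix which is list of str list
--     to distinguish each title and matching content.
--     Finally, the function will return this list
--
--     REQ: titles must be the type of list
--     REQ: content must be the type of list of str list
--     '''
--     # create a list to store content
--     table_list = []
--     # loop through each title, put them as a list into the table_list
--     for title in titles:
--         # put each title as a list into the table_list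
--         table_list.append([title])
--     # loop through each line from the file
--     for line in content:
--         # loop through each element, and matching each element with titles
--         index = 0
--         # check if the line is blank
--         while index < len(table_list) and (line != ['']):
--             table_list[index].append(line[index])
--             index += 1
--     return table_list
-- ===== SOURCE B (Python) =====
-- def store_table_list(titles, content):
--     ''' Column-major re-implementation: build each full column in one pass. '''
--     return [[titles[i]] + [line[i] for line in content if line != ['']]
--             for i in range(len(titles))]
-- ===== Notes on version B (the rewrite author's own statement) =====
-- stated objective: simpler
-- what changed: Replaces the row-major loop that incrementally appends one element to every column per content row with a column-major comprehension that builds each complete column (title plus its cells from non-blank rows) in a single pass.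
import Mathlib
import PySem

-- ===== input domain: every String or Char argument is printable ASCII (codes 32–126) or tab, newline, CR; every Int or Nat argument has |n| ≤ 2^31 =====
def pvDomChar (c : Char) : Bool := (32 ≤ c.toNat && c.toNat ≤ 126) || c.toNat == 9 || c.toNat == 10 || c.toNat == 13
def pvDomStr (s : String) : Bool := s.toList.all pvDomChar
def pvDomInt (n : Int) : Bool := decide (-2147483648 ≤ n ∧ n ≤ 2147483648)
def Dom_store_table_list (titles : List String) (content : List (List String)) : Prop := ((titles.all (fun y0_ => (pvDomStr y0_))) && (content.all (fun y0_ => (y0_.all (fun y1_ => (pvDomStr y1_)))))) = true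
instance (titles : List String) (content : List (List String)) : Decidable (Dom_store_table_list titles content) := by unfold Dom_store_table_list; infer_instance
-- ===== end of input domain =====

-- B builds each complete column (title plus its cells from the non-blank rows) in one
-- column-major pass, instead of A's row-major loop appending one cell to every column per row.

-- ===== PORT A =====
-- the inner "while index < len(table_list) and (line != [''])" loop of A;
-- line[index] is ported with pyGet? (none = IndexError, excluded by Pre_), defaulted to ""
def pvAwhile (tl : List (List String)) (line : List String) (index : Nat) : List (List String) :=
  if h : index < tl.length ∧ line ≠ [""] then
    pvAwhile (tl.set index (tl[index] ++ [(PySem.List.pyGet? line (index : Int)).getD ""])) line (index + 1)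
  else tl
termination_by tl.length - index
decreasing_by simp [List.length_set]; omega

def store_table_list (titles : List String) (content : List (List String)) : List (List String) :=
  content.foldl (fun tl line => pvAwhile tl line 0) (titles.map (fun t => [t]))

-- ===== PORT B =====
def store_table_list_alt (titles : List String) (content : List (List String)) : List (List String) :=
  (List.range titles.length).map (fun i =>
    [titles.getD i ""] ++ (content.filter (fun line => line ≠ [""])).map
      (fun line => (PySem.List.pyGet? line (i : Int)).getD ""))

-- ===== PRECONDITION & SPEC =====
-- Pre_ excludes exactly the inputs on which Python A raises IndexError: a non-blank
-- content line shorter than titles (both A and B index line[i] for every i < len(titles)).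
def Pre_store_table_list (titles : List String) (content : List (List String)) : Prop :=
  ∀ line ∈ content, line = [""] ∨ titles.length ≤ line.length
instance (titles : List String) (content : List (List String)) : Decidable (Pre_store_table_list titles content) := by unfold Pre_store_table_list; infer_instance
def pvWitness_store_table_list : List String × List (List String) :=
  (["a", "b"], [["1", "2"], [""], ["x", "y", "z"]])

def Spec_store_table_list (titles : List String) (content : List (List String)) (out : List (List String)) : Prop := out = store_table_list_alt titles content
instance (titles : List String) (content : List (List String)) (out : List (List String)) : Decidable (Spec_store_table_list titles content out) := by unfold Spec_store_table_list; infer_instance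

-- ===== CLAIM (what is proved, stated in full; the proofs are below) =====
def Claim_equal_store_table_list : Prop := ∀ (titles : List String) (content : List (List String)), Dom_store_table_list titles content → Pre_store_table_list titles content → Spec_store_table_list titles content (store_table_list titles content)

-- ===== LEMMAS AND PROOFS =====

lemma pvMapIdx_id (tl : List (List String)) : List.mapIdx (fun _ col => col) tl = tl := by
  induction tl with
  | nil => rfl
  | cons a l ih => rw [List.mapIdx_cons]; exact congrArg (a :: ·) ih

-- shorthand for the defaulted cell lookup (proof-side only)
def pvCell (line : List String) (i : Nat) : String := (PySem.List.pyGet? line (i : Int)).getD ""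

lemma pvAwhile_length (line : List String) : ∀ tl idx, (pvAwhile tl line idx).length = tl.length := by
  intro tl idx
  rw [pvAwhile]
  split
  · rw [pvAwhile_length line _ (idx+1)]; simp
  · rfl
termination_by tl idx => tl.length - idx
decreasing_by simp [List.length_set]; omega

-- the while loop, columnwise: for a non-blank line it appends cell j to every column j ≥ idx
lemma pvAwhile_getD (line : List String) : ∀ tl idx (j : Nat), j < tl.length →
    (pvAwhile tl line idx).getD j [] =
      if j < idx ∨ line = [""] then tl.getD j [] else tl.getD j [] ++ [pvCell line j] := by
  intro tl idx j hj
  rw [pvAwhile]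
  split
  · rename_i h
    rw [pvAwhile_getD line _ (idx+1) j (by simp [hj])]
    rcases Nat.lt_trichotomy j idx with hlt | heq | hgt
    · simp [List.getD_eq_getElem?_getD, Nat.ne_of_gt hlt, h.2, hlt, Nat.lt_succ_of_lt hlt]
    · subst heq
      simp [List.getD_eq_getElem?_getD, h.1, h.2, pvCell]
    · have h1 : ¬ j < idx + 1 := by omega
      have h2 : ¬ j < idx := by omega
      simp [List.getD_eq_getElem?_getD, Nat.ne_of_lt hgt, h.2, h1, h2]
  · rename_i h
    rw [not_and_or, not_lt, not_not] at h
    by_cases hb : line = [""]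
    · simp [hb]
    · have : tl.length ≤ idx := h.resolve_right hb
      simp [Nat.lt_of_lt_of_le hj this]
termination_by tl idx => tl.length - idx
decreasing_by simp [List.length_set]; omega

-- one step of A's outer fold, as a whole-table transformation
lemma pvStep_eq (tl : List (List String)) (line : List String) :
    pvAwhile tl line 0 =
      if line = [""] then tl else tl.mapIdx (fun j col => col ++ [pvCell line j]) := by
  by_cases hb : line = [""]
  · rw [pvAwhile]; simp [hb]
  · simp only [hb, ite_false]
    apply List.ext_getElem
    · simp [pvAwhile_length]
    · intro j h1 h2
      have hjl : j < tl.length := by rw [pvAwhile_length] at h1; exact h1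
      have := pvAwhile_getD line tl 0 j hjl
      simp only [Nat.not_lt_zero, hb, or_self, if_false] at this
      rw [← List.getD_eq_getElem _ [] h1, this, List.getElem_mapIdx,
        List.getD_eq_getElem _ [] hjl]

-- A's fold, run from any table, appends each non-blank line's cells columnwise
lemma pvFold_eq (content : List (List String)) :
    ∀ tl : List (List String),
      content.foldl (fun tl line => pvAwhile tl line 0) tl =
        tl.mapIdx (fun i col =>
          col ++ (content.filter (fun line => line ≠ [""])).map (fun line => pvCell line i)) := by
  induction content with
  | nil => intro tl; simp [pvMapIdx_id]
  | cons c cs ih =>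
    intro tl
    rw [List.foldl_cons, pvStep_eq]
    by_cases hb : c = [""]
    · simp only [hb, ih, List.filter_cons]
      simp
    · simp only [hb, ite_false, ih, List.mapIdx_mapIdx, List.filter_cons]
      congr 1
      funext i col
      simp [hb, List.append_assoc]

-- ===== VERDICT (by name: the statement is the Claim_ definition above) =====
theorem store_table_list_spec : Claim_equal_store_table_list := by
  intro titles content _ _
  unfold Spec_store_table_list store_table_list store_table_list_alt
  rw [pvFold_eq]
  apply List.ext_getElem
  · simp
  · intro j h1 h2
    simp only [List.getElem_mapIdx, List.getElem_map, List.getElem_range]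
    simp at h1
    simp [pvCell, List.getD_eq_getElem?_getD, List.getElem?_eq_getElem h1]
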